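-- pv_equiv track=rewrite | github.com/dhanasekars/Daily-Python-Practise | 2022/2022-11/Nov_09_Set.py | same_vowel_group
-- ===== SOURCE A (Python) =====
-- def same_vowel_group(w):
--     result = []
--     lst = ['a', 'e', 'i', 'o', 'u']
--     vowels = ([c for c in set(w[0]) if c in lst])
--     check_vowels = list((set(lst)-set(vowels)))
--     for c in w:
--         if set(vowels) <= set(c):
--             result.append(c)
--     for c in result[1:]:
--         if set.intersection(set(check_vowels),set(c)):
--             result.remove(c)
--     return result
-- ===== SOURCE B (Python) =====
-- def same_vowel_group(w):
--     target = {c for c in w[0] if c in 'aeiou'}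
--     return [word for word in w if {c for c in word if c in 'aeiou'} == target]
-- ===== Notes on version B (the rewrite author's own statement) =====
-- stated objective: simpler
-- what changed: One pass testing set-equality of each word's vowel set against the first word's replaces A's two sequential passes (append vowel-superset words, then destructively list.remove words with extra vowels).
import Mathlib
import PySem

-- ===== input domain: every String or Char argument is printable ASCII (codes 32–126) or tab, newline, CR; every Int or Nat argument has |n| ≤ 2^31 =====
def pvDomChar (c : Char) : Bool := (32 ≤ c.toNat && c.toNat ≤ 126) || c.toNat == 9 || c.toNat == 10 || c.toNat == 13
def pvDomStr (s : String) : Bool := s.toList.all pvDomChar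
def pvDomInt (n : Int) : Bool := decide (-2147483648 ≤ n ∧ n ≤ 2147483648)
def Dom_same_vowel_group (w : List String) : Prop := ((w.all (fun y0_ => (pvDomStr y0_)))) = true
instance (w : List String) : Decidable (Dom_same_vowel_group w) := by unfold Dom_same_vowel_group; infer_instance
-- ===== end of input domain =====

-- B replaces A's two passes (append vowel-superset words, then destructively list.remove words
-- with extra vowels) by one vowel-set-equality filter; objective: simpler.

-- ===== PORT A =====
def same_vowel_group (w : List String) : List String :=
  let lst : List Char := ['a', 'e', 'i', 'o', 'u']
  -- w[0]; Pre_ excludes [] where Python raises IndexError, so .getD "" is never taken under Pre_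
  let w0 : String := ((PySem.List.pyGet? w 0).getD "")
  -- [c for c in set(w[0]) if c in lst]  (result used only as a set, so Set iteration order is immaterial)
  let vowels : List Char := (PySem.Set.ofList w0.toList).filter (fun c => lst.contains c)
  let check_vowels : List Char := PySem.Set.diff (PySem.Set.ofList lst) (PySem.Set.ofList vowels)
  let result : List String := w.foldl (fun r c =>
      if PySem.Set.issubset (PySem.Set.ofList vowels) (PySem.Set.ofList c.toList) then r ++ [c] else r) []
  (PySem.List.slice result (some 1) none).foldl (fun r c =>
      if !(PySem.Set.inter (PySem.Set.ofList check_vowels) (PySem.Set.ofList c.toList)).isEmpty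
      -- result.remove(c); c is always present here (proved below), so Python never raises ValueError
      then (PySem.List.remove? r c).getD r else r) result

-- ===== PORT B =====
def same_vowel_group_alt (w : List String) : List String :=
  -- target = {c for c in w[0] if c in 'aeiou'}   (w[0]: .getD "" never taken under Pre_)
  let target : PySem.Set Char :=
    PySem.Set.ofList ((((PySem.List.pyGet? w 0).getD "").toList).filter (fun c => "aeiou".toList.contains c))
  w.filter (fun word =>
    PySem.Set.equal (PySem.Set.ofList (word.toList.filter (fun c => "aeiou".toList.contains c))) target)

-- ===== PRECONDITION & SPEC =====
-- A raises IndexError on the empty list (it indexes w[0]); B raises there too.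
def Pre_same_vowel_group (w : List String) : Prop := w ≠ []
instance (w : List String) : Decidable (Pre_same_vowel_group w) := by unfold Pre_same_vowel_group; infer_instance
def pvWitness_same_vowel_group : List String := ["tap", "cat", "banana"]
def Spec_same_vowel_group (w : List String) (out : List String) : Prop := out = same_vowel_group_alt w
instance (w : List String) (out : List String) : Decidable (Spec_same_vowel_group w out) := by unfold Spec_same_vowel_group; infer_instance

-- ===== CLAIM (what is proved, stated in full; the proofs are below) =====
def Claim_equal_same_vowel_group : Prop := ∀ (w : List String), Dom_same_vowel_group w → Pre_same_vowel_group w → Spec_same_vowel_group w (same_vowel_group w)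

-- ===== LEMMAS AND PROOFS =====

-- the vowel list and the two per-word tests, as named abbreviations for the proofs
def pvLst : List Char := ['a', 'e', 'i', 'o', 'u']

def pvVowels (w0 : String) : List Char :=
  (PySem.Set.ofList w0.toList).filter (fun c => pvLst.contains c)

def pvCheck (w0 : String) : List Char :=
  PySem.Set.diff (PySem.Set.ofList pvLst) (PySem.Set.ofList (pvVowels w0))

def pvSup (w0 c : String) : Bool :=
  PySem.Set.issubset (PySem.Set.ofList (pvVowels w0)) (PySem.Set.ofList c.toList)

def pvBad (w0 c : String) : Bool :=
  !(PySem.Set.inter (PySem.Set.ofList (pvCheck w0)) (PySem.Set.ofList c.toList)).isEmpty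

def pvEq (w0 c : String) : Bool :=
  PySem.Set.equal (PySem.Set.ofList (c.toList.filter (fun x => "aeiou".toList.contains x)))
    (PySem.Set.ofList (w0.toList.filter (fun x => "aeiou".toList.contains x)))

lemma pvBad_iff (w0 c : String) :
    pvBad w0 c = true ↔ ∃ x, x ∈ pvLst ∧ x ∉ w0.toList ∧ x ∈ c.toList := by
  simp only [pvBad, pvCheck, pvVowels, Bool.not_eq_true']
  rw [List.isEmpty_eq_false_iff_exists_mem]
  constructor
  · rintro ⟨x, hx⟩
    simp only [PySem.Set.mem_inter, PySem.Set.mem_diff, PySem.Set.mem_ofList,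
      List.mem_filter] at hx
    obtain ⟨⟨hl, hnv⟩, hc⟩ := hx
    exact ⟨x, hl, fun hw => hnv ⟨hw, by simpa using hl⟩, hc⟩
  · rintro ⟨x, hl, hw, hc⟩
    refine ⟨x, ?_⟩
    simp only [PySem.Set.mem_inter, PySem.Set.mem_diff, PySem.Set.mem_ofList,
      List.mem_filter]
    exact ⟨⟨hl, fun hx => hw hx.1⟩, hc⟩

lemma pvSup_iff (w0 c : String) :
    pvSup w0 c = true ↔ ∀ x, x ∈ w0.toList → x ∈ pvLst → x ∈ c.toList := by
  simp only [pvSup, pvVowels, PySem.Set.issubset_iff, PySem.Set.mem_ofList, List.mem_filter,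
    PySem.Set.mem_ofList]
  constructor
  · intro h x hw hl; exact h x ⟨hw, by simpa using hl⟩
  · rintro h x ⟨hw, hl⟩; exact h x hw (by simpa using hl)

lemma pvEq_iff (w0 c : String) :
    pvEq w0 c = true ↔ ∀ x ∈ pvLst, (x ∈ c.toList ↔ x ∈ w0.toList) := by
  have hs : ("aeiou".toList : List Char) = pvLst := by decide
  simp only [pvEq, PySem.Set.equal_iff, PySem.Set.mem_ofList, List.mem_filter, hs]
  constructor
  · intro h x hl
    constructor
    · intro hc; exact ((h x).mp ⟨hc, by simpa using hl⟩).1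
    · intro hw; exact ((h x).mpr ⟨hw, by simpa using hl⟩).1
  · intro h x
    constructor
    · rintro ⟨hc, hl⟩; exact ⟨(h x (by simpa using hl)).mp hc, hl⟩
    · rintro ⟨hw, hl⟩; exact ⟨(h x (by simpa using hl)).mpr hw, hl⟩

-- per-word equivalence: superset-of-first's-vowels and no extra vowels  =  same vowel set
lemma pv_point (w0 c : String) : (pvSup w0 c && !pvBad w0 c) = pvEq w0 c := by
  rw [Bool.eq_iff_iff, Bool.and_eq_true, Bool.not_eq_true', ← Bool.not_eq_true (pvBad w0 c)]
  rw [pvSup_iff, pvBad_iff, pvEq_iff]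
  constructor
  · rintro ⟨hsup, hbad⟩ x hl
    push_neg at hbad
    constructor
    · intro hc
      by_contra hw
      exact (hbad x hl hw) hc
    · intro hw; exact hsup x hw hl
  · intro h
    refine ⟨fun x hw hl => (h x hl).mpr hw, ?_⟩
    push_neg
    intro x hl hw hc
    exact hw ((h x hl).mp hc)

lemma pv_point_self (w0 : String) : pvSup w0 w0 = true ∧ pvBad w0 w0 = false := by
  constructor
  · rw [pvSup_iff]; exact fun x hw _ => hw
  · rw [← Bool.not_eq_true, pvBad_iff]
    push_neg
    intro x _ hw hc
    exact hw hc

lemma pvEq_self (w0 : String) : pvEq w0 w0 = true := by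
  rw [pvEq_iff]; exact fun x _ => Iff.rfl

-- filter/erase interaction for a value satisfying the predicate
lemma pv_filter_erase_pos (bad : String → Bool) (c : String) (h : bad c = true) :
    ∀ r : List String, (r.erase c).filter bad = (r.filter bad).erase c := by
  intro r
  induction r with
  | nil => simp
  | cons a r ih =>
    by_cases hac : a = c
    · subst hac
      simp [List.erase_cons_head, List.filter_cons, h]
    · rw [List.erase_cons_tail (by simpa using hac)]
      by_cases hb : bad a = true
      · simp only [List.filter_cons, hb, if_true]
        rw [List.erase_cons_tail (by simpa using hac), ih]
      · simp only [List.filter_cons, hb]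
        simpa using ih

lemma pv_filter_erase_neg (bad : String → Bool) (c : String) (h : bad c = true) :
    ∀ r : List String, (r.erase c).filter (fun x => !bad x) = r.filter (fun x => !bad x) := by
  intro r
  induction r with
  | nil => simp
  | cons a r ih =>
    by_cases hac : a = c
    · subst hac
      simp [List.erase_cons_head, List.filter_cons, h]
    · rw [List.erase_cons_tail (by simpa using hac)]
      simp only [List.filter_cons]
      rw [ih]

-- the remove loop: if the bad occurrences of the iterated snapshot match those of the
-- current list (as a multiset), it deletes exactly the bad elements
lemma pv_removeLoop (bad : String → Bool) :
    ∀ (s r : List String),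
      (∀ c, (s.filter bad).count c = (r.filter bad).count c) →
      s.foldl (fun r c => if bad c then (PySem.List.remove? r c).getD r else r) r
        = r.filter (fun c => !bad c) := by
  intro s
  induction s with
  | nil =>
    intro r h
    have hinv : ∀ c ∈ r, bad c = false := by
      intro c hc
      by_contra hb
      rw [Bool.not_eq_false] at hb
      have : c ∈ r.filter bad := List.mem_filter.mpr ⟨hc, hb⟩
      have := List.count_pos_iff.mpr this
      have h0 := h c
      simp at h0
      omega
    simp only [List.foldl_nil]
    rw [List.filter_eq_self.mpr (fun c hc => by simp [hinv c hc])]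
  | cons c s ih =>
    intro r h
    by_cases hb : bad c = true
    · have hcnt := h c
      rw [List.filter_cons, if_pos hb, List.count_cons_self] at hcnt
      have hcr : c ∈ r := by
        have : 0 < (r.filter bad).count c := by omega
        exact (List.mem_filter.mp (List.count_pos_iff.mp this)).1
      have hrm : PySem.List.remove? r c = some (r.erase c) :=
        PySem.List.remove?_eq_some_erase r c hcr
      simp only [List.foldl_cons, hb, if_true, hrm, Option.getD_some]
      rw [ih (r.erase c) ?_, pv_filter_erase_neg bad c hb r]
      intro x
      rw [pv_filter_erase_pos bad c hb r, List.count_erase]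
      have hx := h x
      rw [List.filter_cons, if_pos hb, List.count_cons] at hx
      by_cases hxc : x = c
      · subst hxc
        rw [if_pos (beq_self_eq_true _)] at hx ⊢
        omega
      · have hne : ((x == c) = true) ↔ False := by simpa using hxc
        have hne' : ((c == x) = true) ↔ False := by simpa using Ne.symm hxc
        simp only [hne, hne', if_false] at hx ⊢
        omega
    · simp only [List.foldl_cons, hb, if_false]
      apply ih
      intro x
      have hx := h x
      rw [List.filter_cons, if_neg hb] at hx
      exact hx

lemma pv_hget (w0 : String) (rest : List String) :
    (PySem.List.pyGet? (w0 :: rest) 0).getD "" = w0 := by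
  simpa using PySem.List.pyGet?_natCast (w0 :: rest) 0

lemma pvA_eq (w0 : String) (rest : List String) :
    same_vowel_group (w0 :: rest) =
      (PySem.List.slice ((w0 :: rest).filter (pvSup w0)) (some 1) none).foldl
        (fun r c => if pvBad w0 c then (PySem.List.remove? r c).getD r else r)
        ((w0 :: rest).filter (pvSup w0)) := by
  simp only [same_vowel_group, pv_hget]
  rw [PySem.List.foldl_append_if_eq_filter]
  simp only [List.nil_append]
  rfl

lemma pvB_eq (w0 : String) (rest : List String) :
    same_vowel_group_alt (w0 :: rest) = (w0 :: rest).filter (pvEq w0) := by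
  simp only [same_vowel_group_alt, pv_hget]
  rfl

-- ===== VERDICT (by name: the statement is the Claim_ definition above) =====
theorem same_vowel_group_spec : Claim_equal_same_vowel_group := by
  intro w _ hpre
  unfold Spec_same_vowel_group
  obtain ⟨w0, rest, rfl⟩ : ∃ a l, w = a :: l := by
    cases w with
    | nil => exact absurd rfl hpre
    | cons a l => exact ⟨a, l, rfl⟩
  rw [pvA_eq, pvB_eq]
  have hsup0 := (pv_point_self w0).1
  have hbad0 := (pv_point_self w0).2
  rw [List.filter_cons, if_pos (by simpa using hsup0)]
  rw [PySem.List.slice_from_one]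
  simp only [List.tail_cons]
  rw [pv_removeLoop (pvBad w0) (rest.filter (pvSup w0)) (w0 :: rest.filter (pvSup w0)) ?_]
  · rw [List.filter_cons, if_pos (by simp [hbad0])]
    rw [List.filter_cons, if_pos (by simpa using pvEq_self w0)]
    congr 1
    rw [List.filter_filter]
    apply List.filter_congr
    intro c _
    rw [← pv_point w0 c, Bool.and_comm]
  · intro c
    rw [List.filter_cons, if_neg (by simp [hbad0])]
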